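-- pv_equiv track=rewrite | github.com/DenisToxic/SFTP | core/version_manager.py | _find_download_url
-- ===== SOURCE A (Python) =====
-- from typing import Dict, Optional
--
-- def _find_download_url(assets: list) -> Optional[str]:
--     """Find appropriate download URL for current platform
--
--     Args:
--         assets: List of release assets
--
--     Returns:
--         Download URL or None if not found
--     """
--     # Look for Windows installer first
--     for asset in assets:
--         name = asset['name'].lower()
--         if 'setup.exe' in name or 'installer.exe' in name or name.endswith('_setup.exe'):
--             return asset['browser_download_url']
--
--     # Fallback to any Windows executable
--     for asset in assets:
--         name = asset['name'].lower()
--         if 'windows' in name and name.endswith('.exe'):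
--             return asset['browser_download_url']
--
--     # Last resort - any .exe file
--     for asset in assets:
--         name = asset['name'].lower()
--         if name.endswith('.exe'):
--             return asset['browser_download_url']
--
--     return None
-- ===== SOURCE B (Python) =====
-- def _find_download_url(assets: list):
--     """One pass instead of three: return immediately on a top-tier (installer)
--     match; otherwise remember the first asset of the best lower tier and read
--     its download URL only at the end."""
--     best_tier = 4
--     best = None
--     for asset in assets:
--         name = asset['name'].lower()
--         if 'setup.exe' in name or 'installer.exe' in name or name.endswith('_setup.exe'):
--             return asset['browser_download_url']
--         if 'windows' in name and name.endswith('.exe'):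
--             tier = 2
--         elif name.endswith('.exe'):
--             tier = 3
--         else:
--             continue
--         if tier < best_tier:
--             best_tier = tier
--             best = asset
--     return best['browser_download_url'] if best is not None else None
-- ===== Notes on version B (the rewrite author's own statement) =====
-- stated objective: simpler
-- what changed: Replaces A's three sequential scans of the asset list by one pass that returns at once on a top-tier installer match and otherwise keeps the first asset of the best lower tier, reading its URL only at the end.
import Mathlib
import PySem

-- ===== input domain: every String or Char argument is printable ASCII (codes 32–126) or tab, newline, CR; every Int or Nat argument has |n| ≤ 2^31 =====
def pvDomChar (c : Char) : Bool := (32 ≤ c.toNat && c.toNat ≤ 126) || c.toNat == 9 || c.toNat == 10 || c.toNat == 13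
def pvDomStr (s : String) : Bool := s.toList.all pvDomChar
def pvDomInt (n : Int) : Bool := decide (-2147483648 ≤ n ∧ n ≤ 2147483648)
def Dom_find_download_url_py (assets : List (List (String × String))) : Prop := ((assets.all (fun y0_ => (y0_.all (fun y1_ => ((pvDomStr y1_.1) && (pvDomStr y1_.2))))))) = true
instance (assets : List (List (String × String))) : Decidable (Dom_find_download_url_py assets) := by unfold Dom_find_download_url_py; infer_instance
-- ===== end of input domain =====

-- B replaces A's three sequential scans by one pass: it returns at once on a top-tier installer match and otherwise keeps the first asset of the best lower tier (simpler).


-- ===== PORT A =====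
-- asset['name'].lower(); the getD default "" stands for the KeyError case, which Pre_ excludes
def pvName (a : List (String × String)) : String :=
  PySem.Str.lower (PySem.Dict.getD (PySem.Dict.mk a) "name" "")

-- asset['browser_download_url']; the getD default "" stands for the KeyError case, which Pre_ excludes
def pvUrl (a : List (String × String)) : String :=
  PySem.Dict.getD (PySem.Dict.mk a) "browser_download_url" ""

def pvC1 (n : String) : Bool :=
  PySem.Str.isIn "setup.exe" n || PySem.Str.isIn "installer.exe" n || PySem.Str.endswith n "_setup.exe"
def pvC2 (n : String) : Bool := PySem.Str.isIn "windows" n && PySem.Str.endswith n ".exe"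
def pvC3 (n : String) : Bool := PySem.Str.endswith n ".exe"

-- one 'for asset in assets: if p(name): return asset…' pass of A
def pvFind (p : String → Bool) : List (List (String × String)) → Option (List (String × String))
  | [] => none
  | a :: rest => if p (pvName a) then some a else pvFind p rest

def find_download_url_py (assets : List (List (String × String))) : Option String :=
  match pvFind pvC1 assets with
  | some a => some (pvUrl a)
  | none =>
    match pvFind pvC2 assets with
    | some a => some (pvUrl a)
    | none =>
      match pvFind pvC3 assets with
      | some a => some (pvUrl a)
      | none => none

-- ===== PORT B =====
-- B's single loop with state (best_tier, best); the early 'return' on a tier-1 match,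
-- and the final 'return best[…] if best is not None else None'
def pvGoB : List (List (String × String)) → Nat → Option (List (String × String)) → Option String
  | [], _, best => best.map pvUrl
  | a :: rest, t, best =>
    let n := pvName a
    if pvC1 n then some (pvUrl a)
    else if pvC2 n then (if 2 < t then pvGoB rest 2 (some a) else pvGoB rest t best)
    else if pvC3 n then (if 3 < t then pvGoB rest 3 (some a) else pvGoB rest t best)
    else pvGoB rest t best

def find_download_url_py_alt (assets : List (List (String × String))) : Option String :=
  pvGoB assets 4 none

-- ===== PRECONDITION & SPEC =====
def pvHasName (a : List (String × String)) : Bool := ((PySem.Dict.mk a).get? "name").isSome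
def pvHasUrl (a : List (String × String)) : Bool :=
  ((PySem.Dict.mk a).get? "browser_download_url").isSome
-- priority tier of an asset by its (lowercased) name patterns; 4 = matches nothing
def pvTierOf (a : List (String × String)) : Nat :=
  if pvC1 (pvName a) then 1 else if pvC2 (pvName a) then 2
  else if pvC3 (pvName a) then 3 else 4

-- Pre_ excludes exactly the inputs on which A raises KeyError — a 'name' key missing on an asset A
-- inspects (i.e. not after an earlier installer match), or the selected asset (the first one of the
-- best matching tier) missing 'browser_download_url'; B raises the same KeyError there.
def Pre_find_download_url_py (assets : List (List (String × String))) : Prop :=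
  (∀ i < assets.length, (∀ j < i, pvC1 (pvName (assets.getD j [])) = false) →
      pvHasName (assets.getD i []) = true)
  ∧ (∀ i < assets.length, pvTierOf (assets.getD i []) < 4 →
      (∀ j < assets.length, pvTierOf (assets.getD i []) ≤ pvTierOf (assets.getD j [])) →
      (∀ j < i, pvTierOf (assets.getD i []) < pvTierOf (assets.getD j [])) →
      pvHasUrl (assets.getD i []) = true)
instance (assets : List (List (String × String))) : Decidable (Pre_find_download_url_py assets) := by
  unfold Pre_find_download_url_py; infer_instance

def pvWitness_find_download_url_py : (List (List (String × String))) :=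
  [[("name", "app_setup.exe"), ("browser_download_url", "http://x")]]

def Spec_find_download_url_py (assets : List (List (String × String))) (out : Option String) : Prop := out = find_download_url_py_alt assets
instance (assets : List (List (String × String))) (out : Option String) : Decidable (Spec_find_download_url_py assets out) := by unfold Spec_find_download_url_py; infer_instance

-- ===== CLAIM (what is proved, stated in full; the proofs are below) =====
def Claim_equal_find_download_url_py : Prop := ∀ (assets : List (List (String × String))), Dom_find_download_url_py assets → Pre_find_download_url_py assets → Spec_find_download_url_py assets (find_download_url_py assets)

-- ===== LEMMAS AND PROOFS =====
-- B's loop computes the Option.or-chain of A's three passes, restricted by best_tier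
theorem pvGoB_chain (l : List (List (String × String))) :
    ∀ (t : Nat) (best : Option (List (String × String))),
    pvGoB l t best =
      (((pvFind pvC1 l).or (if 2 < t then pvFind pvC2 l else none)).or
        (((if 3 < t then pvFind pvC3 l else none)).or best)).map pvUrl := by
  induction l with
  | nil => intro t best; simp [pvGoB, pvFind]
  | cons a rest ih =>
    intro t best
    simp only [pvGoB, pvFind]
    by_cases h1 : pvC1 (pvName a)
    · simp [h1]
    · simp only [h1, if_false, Bool.false_eq_true]
      by_cases h2 : pvC2 (pvName a)
      · simp only [h2, if_true]
        by_cases ht : 2 < t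
        · rw [if_pos ht, ih 2 (some a)]
          simp only [show ¬(2 : Nat) < 2 by omega, show ¬(3 : Nat) < 2 by omega, if_pos ht]
          cases pvFind pvC1 rest <;> simp
        · rw [if_neg ht, ih t best]
          simp [ht, show ¬ 3 < t by omega]
      · simp only [h2, if_false, Bool.false_eq_true]
        by_cases h3 : pvC3 (pvName a)
        · simp only [h3, if_true]
          by_cases ht : 3 < t
          · rw [if_pos ht, ih 3 (some a)]
            simp only [show (2 : Nat) < 3 by omega, if_pos, show ¬(3 : Nat) < 3 by omega,
              if_pos ht, if_pos (show 2 < t by omega)]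
            cases hf : pvFind pvC1 rest <;> cases hg : pvFind pvC2 rest <;> simp
          · rw [if_neg ht, ih t best]
            simp [ht]
        · simp only [h3, if_false, Bool.false_eq_true, ih t best]

theorem find_download_url_py_spec : Claim_equal_find_download_url_py := by
  unfold Claim_equal_find_download_url_py
  intro assets _ _
  unfold Spec_find_download_url_py find_download_url_py find_download_url_py_alt
  rw [pvGoB_chain assets 4 none]
  simp only [show (2:Nat) < 4 by omega, show (3:Nat) < 4 by omega, if_pos, Option.or_none]
  cases pvFind pvC1 assets <;> cases pvFind pvC2 assets <;> cases pvFind pvC3 assets <;> simp
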